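-- pv_equiv track=rewrite | github.com/axel-magard/YTTRDB | YTTRDByt.py | analyzeURL
-- ===== SOURCE A (Python) =====
-- def analyzeURL(url):
--     video_id = ""
--     pl_id = ""
--     for w in url.split("?")[-1].split("&"):
--         kw, v = w.split("=")
--         if kw == "list":
--             pl_id = v
--         if kw == "v":
--             video_id = v
--     return(video_id,pl_id)
-- ===== SOURCE B (Python) =====
-- def analyzeURL(url):
--     pairs = [w.split("=") for w in url.split("?")[-1].split("&")]
--     def last_value(key):
--         for k, v in reversed(pairs):
--             if k == key:
--                 return v
--         return ""
--     return (last_value("v"), last_value("list"))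
-- ===== Notes on version B (the rewrite author's own statement) =====
-- stated objective: alternative
-- what changed: B splits all tokens first and then answers each key by a backward scan with early exit (first match from the end = last occurrence), instead of A's forward single pass that branches per token into two mutable accumulators.
import Mathlib
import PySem

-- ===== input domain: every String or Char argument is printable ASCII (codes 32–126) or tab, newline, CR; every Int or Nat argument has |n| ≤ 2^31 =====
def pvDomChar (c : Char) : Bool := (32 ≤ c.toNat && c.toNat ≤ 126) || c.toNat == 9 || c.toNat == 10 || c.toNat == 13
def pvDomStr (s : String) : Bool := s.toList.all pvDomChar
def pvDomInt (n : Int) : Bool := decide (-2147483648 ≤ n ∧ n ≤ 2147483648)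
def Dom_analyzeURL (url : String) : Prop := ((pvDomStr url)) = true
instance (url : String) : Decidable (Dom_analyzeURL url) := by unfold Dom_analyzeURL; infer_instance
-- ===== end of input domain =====

-- B splits all tokens first, then answers each key by a backward scan with early exit
-- (first match from the end = last occurrence), instead of A's forward branching accumulator pass.


-- ===== PORT A =====
-- url.split("?")[-1]: splitOn never returns [], so the [-1] index is total; getLast! is exact here.
-- s.split(sep) with nonempty sep: split? is always 'some' there, so .getD [] is exact.
def pvSplit (s sep : String) : List String := (PySem.Str.split? s sep).getD []

def pvTokens (url : String) : List String :=
  pvSplit ((pvSplit url "?").getLast!) "&"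

-- the loop body: kw, v = w.split("="); if kw == "list": pl_id = v; if kw == "v": video_id = v
-- (Pre_ guarantees the split has exactly two parts; the _ branch is unreachable there)
def pvStepA (s : String × String) (w : String) : String × String :=
  match pvSplit w "=" with
  | [kw, v] =>
    let s1 := if kw == "list" then (s.1, v) else s
    if kw == "v" then (v, s1.2) else s1
  | _ => s

def analyzeURL (url : String) : String × String :=
  (pvTokens url).foldl pvStepA ("", "")

-- ===== PORT B =====
-- pairs = [w.split("=") for w in ...]
def pvPairs (url : String) : List (List String) :=
  (pvTokens url).map (fun w => pvSplit w "=")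

-- last_value(key): backward scan, return v at the first pair whose key matches, else "".
-- (the _ branch is where Python's 'k, v = pair' unpacking would raise; Pre_ excludes it)
def pvFindRev (key : String) : List (List String) → Option String
  | [] => none
  | p :: rest =>
    match p with
    | [k, v] => if k == key then some v else pvFindRev key rest
    | _ => pvFindRev key rest

def pvLastValue (pairs : List (List String)) (key : String) : String :=
  (pvFindRev key pairs.reverse).getD ""

def analyzeURL_alt (url : String) : String × String :=
  (pvLastValue (pvPairs url) "v", pvLastValue (pvPairs url) "list")

-- ===== PRECONDITION & SPEC =====
-- Pre_ excludes exactly the URLs on which Python raises ValueError: a query token whose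
-- split on "=" does not have exactly two parts (tuple unpacking fails in A and B alike).
def Pre_analyzeURL (url : String) : Prop :=
  ∀ w ∈ pvTokens url, (pvSplit w "=").length = 2
instance (url : String) : Decidable (Pre_analyzeURL url) := by unfold Pre_analyzeURL; infer_instance

def pvWitness_analyzeURL : String := "https://youtu.be/watch?v=abc&list=PL1"

def Spec_analyzeURL (url : String) (out : String × String) : Prop := out = analyzeURL_alt url
instance (url : String) (out : String × String) : Decidable (Spec_analyzeURL url out) := by unfold Spec_analyzeURL; infer_instance

-- ===== CLAIM (what is proved, stated in full; the proofs are below) =====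
def Claim_equal_analyzeURL : Prop := ∀ (url : String), Dom_analyzeURL url → Pre_analyzeURL url → Spec_analyzeURL url (analyzeURL url)

-- ===== LEMMAS AND PROOFS =====

theorem pvFindRev_append (key : String) (xs ys : List (List String)) :
    pvFindRev key (xs ++ ys) =
      (pvFindRev key xs).orElse (fun _ => pvFindRev key ys) := by
  induction xs with
  | nil => simp [pvFindRev]
  | cons p rest ih =>
    match p with
    | [k, v] =>
      by_cases h : k == key <;> simp [pvFindRev, h, ih]
    | [] => simpa [pvFindRev] using ih
    | [a] => simpa [pvFindRev] using ih
    | a :: b :: c :: t => simpa [pvFindRev] using ih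

-- Invariant of A's fold: its accumulator equals B's backward search with the
-- accumulator as default, for any list of well-formed tokens.
theorem pv_fold_eq_findRev (l : List String) :
    ∀ (a b : String),
    (∀ w ∈ l, (pvSplit w "=").length = 2) →
    l.foldl pvStepA (a, b) =
      ((pvFindRev "v" (l.map (fun w => pvSplit w "=")).reverse).getD a,
       (pvFindRev "list" (l.map (fun w => pvSplit w "=")).reverse).getD b) := by
  induction l with
  | nil => intro a b _; simp [pvFindRev]
  | cons w l ih =>
    intro a b hl
    have hw : (pvSplit w "=").length = 2 := hl w (by simp)
    obtain ⟨k, v, hkv⟩ : ∃ k v, pvSplit w "=" = [k, v] := by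
      match h : pvSplit w "=" with
      | [] => rw [h] at hw; simp at hw
      | [x] => rw [h] at hw; simp at hw
      | [x, y] => exact ⟨x, y, rfl⟩
      | x :: y :: z :: t => rw [h] at hw; simp at hw
    have hrev : ((w :: l).map (fun w => pvSplit w "=")).reverse
        = (l.map (fun w => pvSplit w "=")).reverse ++ [[k, v]] := by
      simp [hkv]
    simp only [List.foldl_cons, hrev, pvFindRev_append]
    have hstep : pvStepA (a, b) w =
        (if k == "v" then v else a, if k == "list" then v else b) := by
      simp only [pvStepA, hkv]
      by_cases h1 : k == "v" <;> by_cases h2 : k == "list" <;> simp [h1, h2]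
    rw [hstep, ih _ _ (fun x hx => hl x (by simp [hx]))]
    congr 1
    · cases pvFindRev "v" (l.map (fun w => pvSplit w "=")).reverse <;>
        by_cases h1 : k == "v" <;> simp [Option.orElse, pvFindRev, h1]
    · cases pvFindRev "list" (l.map (fun w => pvSplit w "=")).reverse <;>
        by_cases h2 : k == "list" <;> simp [Option.orElse, pvFindRev, h2]

-- ===== VERDICT (by name: the statement is the Claim_ definition above) =====
theorem analyzeURL_spec : Claim_equal_analyzeURL := by
  intro url _ hpre
  unfold Spec_analyzeURL analyzeURL analyzeURL_alt pvLastValue pvPairs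
  exact pv_fold_eq_findRev (pvTokens url) "" "" hpre
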